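-- pv_equiv track=rewrite | github.com/yogan/advent-of-code | 2022/day-18-python/day18.py | grows_to_edge
-- ===== SOURCE A (Python) =====
-- def dimensions(cubes):
--     x_min = min(cubes, key=lambda c: c[0])[0]
--     x_max = max(cubes, key=lambda c: c[0])[0]
--     y_min = min(cubes, key=lambda c: c[1])[1]
--     y_max = max(cubes, key=lambda c: c[1])[1]
--     z_min = min(cubes, key=lambda c: c[2])[2]
--     z_max = max(cubes, key=lambda c: c[2])[2]
--     return (x_min, x_max, y_min, y_max, z_min, z_max)
--
-- def grows_to_edge(cube, cubes, air_cubes):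
--     def get_neighbors(cube):
--         x, y, z = cube
--         return {
--             (x - 1, y, z),
--             (x + 1, y, z),
--             (x, y - 1, z),
--             (x, y + 1, z),
--             (x, y, z - 1),
--             (x, y, z + 1),
--         }
--
--     def on_edge(cube, dim):
--         x, y, z = cube
--         x_min, x_max, y_min, y_max, z_min, z_max = dim
--         return (
--             x == x_min
--             or x == x_max
--             or y == y_min
--             or y == y_max
--             or z == z_min
--             or z == z_max
--         )
--
--     if cube in air_cubes:
--         # already found in some other run, no need to check again
--         return False
--
--     x, y, z = cube
--     dim = dimensions(cubes)
--     x_min, x_max, y_min, y_max, z_min, z_max = dim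
--     assert (
--         x_min <= x <= x_max and y_min <= y <= y_max and z_min <= z <= z_max
--     ), f"initial cube {cube} already outside of dimensions {dim}"
--
--     border = {cube}
--     visited = set(cubes).union(air_cubes, border)
--
--     while len(border) > 0:
--         if any(on_edge(c, dim) for c in border):
--             return True
--
--         new_border = set()
--
--         for border_cube in border:
--             for neighbor in get_neighbors(border_cube):
--                 if neighbor not in visited:
--                     new_border.add(neighbor)
--
--         border = new_border
--         visited |= border
--
--     return False
-- ===== SOURCE B (Python) =====
-- from collections import deque
--
--
-- def dimensions(cubes):
--     x_min = min(cubes, key=lambda c: c[0])[0]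
--     x_max = max(cubes, key=lambda c: c[0])[0]
--     y_min = min(cubes, key=lambda c: c[1])[1]
--     y_max = max(cubes, key=lambda c: c[1])[1]
--     z_min = min(cubes, key=lambda c: c[2])[2]
--     z_max = max(cubes, key=lambda c: c[2])[2]
--     return (x_min, x_max, y_min, y_max, z_min, z_max)
--
--
-- def grows_to_edge(cube, cubes, air_cubes):
--     # Single-queue BFS: pop one cube at a time, test the edge on pop,
--     # mark neighbors visited as they are pushed.
--     if cube in air_cubes:
--         return False
--
--     x, y, z = cube
--     dim = dimensions(cubes)
--     x_min, x_max, y_min, y_max, z_min, z_max = dim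
--     assert (
--         x_min <= x <= x_max and y_min <= y <= y_max and z_min <= z <= z_max
--     ), f"initial cube {cube} already outside of dimensions {dim}"
--
--     visited = set(cubes)
--     visited.update(air_cubes)
--     visited.add(cube)
--     queue = deque([cube])
--
--     while queue:
--         cx, cy, cz = queue.popleft()
--         if (cx == x_min or cx == x_max or cy == y_min or cy == y_max
--                 or cz == z_min or cz == z_max):
--             return True
--         for n in ((cx - 1, cy, cz), (cx + 1, cy, cz), (cx, cy - 1, cz),
--                   (cx, cy + 1, cz), (cx, cy, cz - 1), (cx, cy, cz + 1)):
--             if n not in visited: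
--                 visited.add(n)
--                 queue.append(n)
--
--     return False
-- ===== Notes on version B (the rewrite author's own statement) =====
-- stated objective: simpler
-- what changed: The level-synchronized frontier BFS (per-level any() edge scan, then a two-phase expansion of the whole border into a fresh set) is flattened into a single FIFO-queue BFS that pops one cube at a time, tests the edge on pop, and marks neighbors visited as they are pushed.
import Mathlib
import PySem

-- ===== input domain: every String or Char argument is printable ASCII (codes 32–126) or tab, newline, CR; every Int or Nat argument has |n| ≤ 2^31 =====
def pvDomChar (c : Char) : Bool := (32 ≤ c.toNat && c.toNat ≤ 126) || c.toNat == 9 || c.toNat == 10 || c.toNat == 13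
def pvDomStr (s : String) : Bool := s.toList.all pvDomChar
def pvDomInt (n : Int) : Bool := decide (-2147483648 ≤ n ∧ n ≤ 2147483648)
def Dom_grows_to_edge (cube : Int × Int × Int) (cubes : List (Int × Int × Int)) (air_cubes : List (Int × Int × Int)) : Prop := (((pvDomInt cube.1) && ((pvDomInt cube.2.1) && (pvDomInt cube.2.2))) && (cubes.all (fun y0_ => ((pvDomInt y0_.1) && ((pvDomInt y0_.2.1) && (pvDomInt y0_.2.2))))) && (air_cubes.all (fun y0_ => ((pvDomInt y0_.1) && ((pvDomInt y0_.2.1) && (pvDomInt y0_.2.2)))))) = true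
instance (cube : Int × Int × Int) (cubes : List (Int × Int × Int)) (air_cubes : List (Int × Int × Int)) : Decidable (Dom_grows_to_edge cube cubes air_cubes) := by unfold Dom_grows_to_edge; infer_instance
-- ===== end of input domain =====

-- B replaces the level-synchronized frontier BFS (two-phase: scan the whole border for an
-- edge hit, then expand it into a fresh set) by a single FIFO-queue BFS that pops one cube
-- at a time, tests the edge on pop and marks neighbors visited as they are pushed
-- (objective: simpler).

-- ===== PORT A =====
-- shared module helper `dimensions(cubes)` (none = ValueError of min()/max() on an empty list)
def pvDimensions (cubes : List (Int × Int × Int)) : Option (Int × Int × Int × Int × Int × Int) :=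
  match PySem.List.min? cubes (fun c => c.1), PySem.List.max? cubes (fun c => c.1),
        PySem.List.min? cubes (fun c => c.2.1), PySem.List.max? cubes (fun c => c.2.1),
        PySem.List.min? cubes (fun c => c.2.2), PySem.List.max? cubes (fun c => c.2.2) with
  | some mx, some Mx, some my, some My, some mz, some Mz =>
      some (mx.1, Mx.1, my.2.1, My.2.1, mz.2.2, Mz.2.2)
  | _, _, _, _, _, _ => none

-- the six axis neighbors of a cube, in source order (list form; A wraps it in a set literal)
def pvNeighborList (c : Int × Int × Int) : List (Int × Int × Int) :=
  match c with
  | (x, y, z) => [(x - 1, y, z), (x + 1, y, z), (x, y - 1, z), (x, y + 1, z), (x, y, z - 1), (x, y, z + 1)]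

-- A's nested `get_neighbors`: a set literal
def pvGetNeighbors (c : Int × Int × Int) : PySem.Set (Int × Int × Int) :=
  PySem.Set.ofList (pvNeighborList c)

-- nested `on_edge(cube, dim)`
def pvOnEdge (c : Int × Int × Int) (dim : Int × Int × Int × Int × Int × Int) : Bool :=
  match c, dim with
  | (x, y, z), (x_min, x_max, y_min, y_max, z_min, z_max) =>
    x == x_min || x == x_max || y == y_min || y == y_max || z == z_min || z == z_max

-- the in-box condition of A's assert (assert failure = AssertionError, excluded by Pre_)
def pvInBox (c : Int × Int × Int) (dim : Int × Int × Int × Int × Int × Int) : Bool :=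
  match c, dim with
  | (x, y, z), (x_min, x_max, y_min, y_max, z_min, z_max) =>
    decide (x_min ≤ x) && decide (x ≤ x_max) && decide (y_min ≤ y) && decide (y ≤ y_max) &&
    decide (z_min ≤ z) && decide (z ≤ z_max)

-- fuel for the while loops: enough for any run that stays inside the bounding box
-- (Python needs none; both loops provably terminate within this bound on Pre_ inputs)
def pvFuel (dim : Int × Int × Int × Int × Int × Int) : Nat :=
  match dim with
  | (x_min, x_max, y_min, y_max, z_min, z_max) =>
    (x_max + 1 - x_min).toNat * (y_max + 1 - y_min).toNat * (z_max + 1 - z_min).toNat + 2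

-- one level expansion: `new_border = set(); for border_cube in border: for neighbor in ...`
def pvNewBorder (border visited : PySem.Set (Int × Int × Int)) : PySem.Set (Int × Int × Int) :=
  border.foldl
    (fun nb border_cube =>
      (pvGetNeighbors border_cube).foldl
        (fun nb2 neighbor =>
          if PySem.Set.contains visited neighbor then nb2 else PySem.Set.add nb2 neighbor)
        nb)
    PySem.Set.empty

-- `while len(border) > 0: ...`
def pvGoA (dim : Int × Int × Int × Int × Int × Int) (border visited : PySem.Set (Int × Int × Int)) :
    Nat → Bool
  | 0 => false
  | fuel + 1 =>
    if 0 < PySem.Set.len border then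
      if border.any (fun c => pvOnEdge c dim) then true
      else
        let nb := pvNewBorder border visited
        pvGoA dim nb (PySem.Set.union visited nb) fuel
    else false

def grows_to_edge (cube : Int × Int × Int) (cubes : List (Int × Int × Int)) (air_cubes : List (Int × Int × Int)) : Bool :=
  if cube ∈ air_cubes then false
  else
    match pvDimensions cubes with
    | none => false          -- ValueError (empty cubes), excluded by Pre_
    | some dim =>
      if pvInBox cube dim then
        let border : PySem.Set (Int × Int × Int) := PySem.Set.ofList [cube]
        let visited := PySem.Set.union (PySem.Set.union (PySem.Set.ofList cubes) air_cubes) border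
        pvGoA dim border visited (pvFuel dim)
      else false             -- AssertionError, excluded by Pre_

-- ===== PORT B =====
-- `while queue: c = queue.popleft(); ...` — pop one cube, test edge on pop, mark on push
def pvGoB (dim : Int × Int × Int × Int × Int × Int) :
    List (Int × Int × Int) → PySem.Set (Int × Int × Int) → Nat → Bool
  | _, _, 0 => false
  | [], _, _ + 1 => false
  | c :: rest, visited, fuel + 1 =>
    if pvOnEdge c dim then true
    else
      let st := (pvNeighborList c).foldl
        (fun (st : List (Int × Int × Int) × PySem.Set (Int × Int × Int)) n =>
          if PySem.Set.contains st.2 n then st else (st.1 ++ [n], PySem.Set.add st.2 n))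
        (rest, visited)
      pvGoB dim st.1 st.2 fuel

def grows_to_edge_alt (cube : Int × Int × Int) (cubes : List (Int × Int × Int)) (air_cubes : List (Int × Int × Int)) : Bool :=
  if cube ∈ air_cubes then false
  else
    match pvDimensions cubes with
    | none => false          -- ValueError (empty cubes), excluded by Pre_
    | some dim =>
      if pvInBox cube dim then
        let visited := PySem.Set.add (PySem.Set.update (PySem.Set.ofList cubes) air_cubes) cube
        pvGoB dim [cube] visited (pvFuel dim)
      else false             -- AssertionError, excluded by Pre_

-- ===== PRECONDITION & SPEC =====
-- Pre_ excludes exactly the inputs where A raises: cubes = [] with cube ∉ air_cubes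
-- (ValueError from min()), and cube outside the bounding box of cubes (AssertionError);
-- A returns no value there (and B raises identically).
def Pre_grows_to_edge (cube : Int × Int × Int) (cubes : List (Int × Int × Int)) (air_cubes : List (Int × Int × Int)) : Prop :=
  cube ∈ air_cubes ∨
    ((∃ a ∈ cubes, a.1 ≤ cube.1) ∧ (∃ a ∈ cubes, cube.1 ≤ a.1) ∧
     (∃ a ∈ cubes, a.2.1 ≤ cube.2.1) ∧ (∃ a ∈ cubes, cube.2.1 ≤ a.2.1) ∧
     (∃ a ∈ cubes, a.2.2 ≤ cube.2.2) ∧ (∃ a ∈ cubes, cube.2.2 ≤ a.2.2))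
instance (cube : Int × Int × Int) (cubes : List (Int × Int × Int)) (air_cubes : List (Int × Int × Int)) : Decidable (Pre_grows_to_edge cube cubes air_cubes) := by unfold Pre_grows_to_edge; infer_instance

def pvWitness_grows_to_edge : (Int × Int × Int) × (List (Int × Int × Int)) × (List (Int × Int × Int)) :=
  ((0, 0, 0), [(0, 0, 0)], [])

def Spec_grows_to_edge (cube : Int × Int × Int) (cubes : List (Int × Int × Int)) (air_cubes : List (Int × Int × Int)) (out : Bool) : Prop := out = grows_to_edge_alt cube cubes air_cubes
instance (cube : Int × Int × Int) (cubes : List (Int × Int × Int)) (air_cubes : List (Int × Int × Int)) (out : Bool) : Decidable (Spec_grows_to_edge cube cubes air_cubes out) := by unfold Spec_grows_to_edge; infer_instance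

-- ===== CLAIM (what is proved, stated in full; the proofs are below) =====
def Claim_equal_grows_to_edge : Prop := ∀ (cube : Int × Int × Int) (cubes : List (Int × Int × Int)) (air_cubes : List (Int × Int × Int)), Dom_grows_to_edge cube cubes air_cubes → Pre_grows_to_edge cube cubes air_cubes → Spec_grows_to_edge cube cubes air_cubes (grows_to_edge cube cubes air_cubes)

-- ===== LEMMAS AND PROOFS =====

-- Reachability from a along axis steps that avoid V (every vertex after the first avoids V).
inductive pvRA (V : (Int × Int × Int) → Prop) : (Int × Int × Int) → (Int × Int × Int) → Prop
  | refl (a : Int × Int × Int) : pvRA V a a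
  | head {a b c : Int × Int × Int} :
      b ∈ pvNeighborList a → ¬ V b → pvRA V b c → pvRA V a c

-- "from some frontier cube, an edge cube is reachable avoiding V"
def pvER (dim : Int × Int × Int × Int × Int × Int) (front : List (Int × Int × Int))
    (V : (Int × Int × Int) → Prop) : Prop :=
  ∃ b ∈ front, ∃ c, pvRA V b c ∧ pvOnEdge c dim = true

lemma pvRA_mono {V W : (Int × Int × Int) → Prop} (h : ∀ x, W x → V x)
    {a c : Int × Int × Int} (hr : pvRA V a c) : pvRA W a c := by
  induction hr with
  | refl => exact pvRA.refl _
  | head hn hv _ ih => exact pvRA.head hn (fun hw => hv (h _ hw)) ih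

lemma pvRA_upgrade {V N : (Int × Int × Int) → Prop} {a c : Int × Int × Int}
    (hr : pvRA V a c) :
    pvRA (fun x => V x ∨ N x) a c ∨ ∃ d, N d ∧ pvRA (fun x => V x ∨ N x) d c := by
  induction hr with
  | refl => exact Or.inl (pvRA.refl _)
  | @head a b c hn hv _ ih =>
    rcases ih with ih | ih
    · by_cases hb : N b
      · exact Or.inr ⟨b, hb, ih⟩
      · exact Or.inl (pvRA.head hn (by tauto) ih)
    · exact Or.inr ih

lemma pvER_congr {dim front} {V W : (Int × Int × Int) → Prop} (h : ∀ x, V x ↔ W x) :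
    pvER dim front V ↔ pvER dim front W := by
  constructor <;>
    rintro ⟨b, hb, c, hr, hc⟩ <;>
    exact ⟨b, hb, c, pvRA_mono (fun x hx => by rw [h] at *; tauto) hr, hc⟩

-- frontier step: an edge cube is reachable from `front` avoiding V iff the frontier itself
-- hits the edge or an edge cube is reachable from the fresh cubes NB avoiding V ∪ NB
lemma pvER_step {dim} {front NB : List (Int × Int × Int)} {V : (Int × Int × Int) → Prop}
    (hNB : ∀ n, n ∈ NB ↔ ∃ b ∈ front, n ∈ pvNeighborList b ∧ ¬ V n) :
    pvER dim front V ↔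
      (∃ b ∈ front, pvOnEdge b dim = true) ∨ pvER dim NB (fun x => V x ∨ x ∈ NB) := by
  constructor
  · rintro ⟨b, hb, c, hr, hc⟩
    cases hr with
    | refl => exact Or.inl ⟨b, hb, hc⟩
    | @head _ x _ hn hv hr' =>
      have hxNB : x ∈ NB := (hNB x).2 ⟨b, hb, hn, hv⟩
      rcases pvRA_upgrade (N := fun y => y ∈ NB) hr' with h | ⟨d, hd, h⟩
      · exact Or.inr ⟨x, hxNB, c, h, hc⟩
      · exact Or.inr ⟨d, hd, c, h, hc⟩
  · rintro (⟨b, hb, hc⟩ | ⟨d, hd, c, hr, hc⟩)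
    · exact ⟨b, hb, b, pvRA.refl _, hc⟩
    · obtain ⟨b, hb, hn, hv⟩ := (hNB d).1 hd
      exact ⟨b, hb, c, pvRA.head hn hv (pvRA_mono (fun x hx => Or.inl hx) hr), hc⟩

-- the closed bounding box as a finite set
noncomputable def pvBox (dim : Int × Int × Int × Int × Int × Int) : Finset (Int × Int × Int) :=
  match dim with
  | (x_min, x_max, y_min, y_max, z_min, z_max) =>
    Finset.Icc x_min x_max ×ˢ Finset.Icc y_min y_max ×ˢ Finset.Icc z_min z_max

lemma pvMem_box {dim : Int × Int × Int × Int × Int × Int} {c : Int × Int × Int} :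
    c ∈ pvBox dim ↔
      dim.1 ≤ c.1 ∧ c.1 ≤ dim.2.1 ∧ dim.2.2.1 ≤ c.2.1 ∧ c.2.1 ≤ dim.2.2.2.1 ∧
      dim.2.2.2.2.1 ≤ c.2.2 ∧ c.2.2 ≤ dim.2.2.2.2.2 := by
  obtain ⟨xm, xM, ym, yM, zm, zM⟩ := dim
  obtain ⟨x, y, z⟩ := c
  simp [pvBox, Finset.mem_product, Finset.mem_Icc]
  tauto

lemma pvBox_card_le (dim : Int × Int × Int × Int × Int × Int) :
    (pvBox dim).card + 2 ≤ pvFuel dim := by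
  obtain ⟨xm, xM, ym, yM, zm, zM⟩ := dim
  simp [pvBox, pvFuel, Finset.card_product, Int.card_Icc]
  exact Nat.le_of_eq (Nat.mul_assoc _ _ _).symm

-- a neighbor of a non-edge box cube stays in the box
lemma pvNbr_in_box {dim : Int × Int × Int × Int × Int × Int} {b n : Int × Int × Int}
    (hb : b ∈ pvBox dim) (he : pvOnEdge b dim = false) (hn : n ∈ pvNeighborList b) :
    n ∈ pvBox dim := by
  obtain ⟨xm, xM, ym, yM, zm, zM⟩ := dim
  obtain ⟨x, y, z⟩ := b
  rw [pvMem_box] at hb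
  simp [pvOnEdge] at he
  simp [pvNeighborList] at hn
  rcases hn with h | h | h | h | h | h <;> subst h <;> rw [pvMem_box] <;>
    simp_all <;> omega

lemma pvMemAddIf (visited : PySem.Set (Int × Int × Int)) (ns : List (Int × Int × Int)) :
    ∀ (acc : PySem.Set (Int × Int × Int)) (n : Int × Int × Int),
      n ∈ ns.foldl (fun s m => if PySem.Set.contains visited m then s else PySem.Set.add s m) acc ↔
      n ∈ acc ∨ (n ∈ ns ∧ n ∉ visited) := by
  induction ns with
  | nil => simp
  | cons m ms ih =>
    intro acc n
    simp only [List.foldl_cons]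
    by_cases hm : m ∈ visited
    · rw [if_pos ((PySem.Set.contains_iff _ _).2 hm), ih]
      simp only [List.mem_cons]
      constructor
      · rintro (h | ⟨h1, h2⟩); exacts [Or.inl h, Or.inr ⟨Or.inr h1, h2⟩]
      · rintro (h | ⟨h1 | h1, h2⟩)
        exacts [Or.inl h, absurd (h1 ▸ hm) h2, Or.inr ⟨h1, h2⟩]
    · rw [if_neg (by simpa [PySem.Set.contains_iff] using hm), ih]
      rw [PySem.Set.mem_add]
      simp only [List.mem_cons]
      constructor
      · rintro ((h | h) | ⟨h1, h2⟩)
        exacts [Or.inl h, Or.inr ⟨Or.inl h, h ▸ hm⟩, Or.inr ⟨Or.inr h1, h2⟩]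
      · rintro (h | ⟨h1 | h1, h2⟩)
        exacts [Or.inl (Or.inl h), Or.inl (Or.inr h1), Or.inr ⟨h1, h2⟩]

lemma pvMem_newBorder (border visited : PySem.Set (Int × Int × Int)) (n : Int × Int × Int) :
    n ∈ pvNewBorder border visited ↔
      ∃ b ∈ border, n ∈ pvNeighborList b ∧ n ∉ visited := by
  unfold pvNewBorder
  suffices h : ∀ (bs : List (Int × Int × Int)) (acc : PySem.Set (Int × Int × Int)),
      n ∈ bs.foldl (fun nb bc => (pvGetNeighbors bc).foldl
        (fun nb2 m => if PySem.Set.contains visited m then nb2 else PySem.Set.add nb2 m) nb) acc ↔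
      n ∈ acc ∨ ∃ b ∈ bs, n ∈ pvNeighborList b ∧ n ∉ visited by
    rw [h]; simp [PySem.Set.empty]
  intro bs
  induction bs with
  | nil => simp
  | cons b bs ih =>
    intro acc
    simp only [List.foldl_cons]
    rw [ih, pvMemAddIf]
    have : n ∈ pvGetNeighbors b ↔ n ∈ pvNeighborList b := PySem.Set.mem_ofList _ _
    simp only [List.mem_cons]
    constructor
    · rintro ((h | ⟨h1, h2⟩) | ⟨c, hc, h1, h2⟩)
      exacts [Or.inl h, Or.inr ⟨b, Or.inl rfl, this.1 h1, h2⟩, Or.inr ⟨c, Or.inr hc, h1, h2⟩]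
    · rintro (h | ⟨c, hc | hc, h1, h2⟩)
      exacts [Or.inl (Or.inl h), Or.inl (Or.inr ⟨this.2 (hc ▸ h1), h2⟩), Or.inr ⟨c, hc, h1, h2⟩]

lemma pvGoA_nil (dim : Int × Int × Int × Int × Int × Int) (v : PySem.Set (Int × Int × Int))
    (fuel : Nat) : pvGoA dim [] v fuel = false := by
  cases fuel <;> simp [pvGoA, PySem.Set.len]


lemma pvNodup_neighborList (c : Int × Int × Int) : (pvNeighborList c).Nodup := by
  obtain ⟨x, y, z⟩ := c
  simp [pvNeighborList, List.nodup_cons, List.mem_cons, Prod.mk.injEq]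
  omega

lemma pvPush_foldl : ∀ (ns : List (Int × Int × Int)), ns.Nodup →
    ∀ (q : List (Int × Int × Int)) (v : PySem.Set (Int × Int × Int)),
      ns.foldl (fun (st : List (Int × Int × Int) × PySem.Set (Int × Int × Int)) n =>
          if PySem.Set.contains st.2 n then st else (st.1 ++ [n], PySem.Set.add st.2 n)) (q, v)
      = (q ++ ns.filter (fun n => !PySem.Set.contains v n),
         PySem.Set.update v (ns.filter (fun n => !PySem.Set.contains v n))) := by
  intro ns
  induction ns with
  | nil => intro _ q v; simp [PySem.Set.update]
  | cons n ns ih =>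
    intro hnd q v
    have hnmem : n ∉ ns := (List.nodup_cons.1 hnd).1
    have hnd' : ns.Nodup := (List.nodup_cons.1 hnd).2
    have hfilter : ns.filter (fun m => !PySem.Set.contains (PySem.Set.add v n) m)
        = ns.filter (fun m => !PySem.Set.contains v m) := by
      apply List.filter_congr
      intro m hm
      have hmn : m ≠ n := fun h => hnmem (h ▸ hm)
      have hiff : (m ∈ PySem.Set.add v n) ↔ m ∈ v := by
        rw [PySem.Set.mem_add]; tauto
      have hcc : PySem.Set.contains (PySem.Set.add v n) m = PySem.Set.contains v m := by
        cases h1 : PySem.Set.contains (PySem.Set.add v n) m <;>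
          cases h2 : PySem.Set.contains v m <;> try rfl
        · have h3 := (PySem.Set.contains_iff (PySem.Set.add v n) m).2
            (hiff.2 ((PySem.Set.contains_iff v m).1 h2))
          rw [h1] at h3
          exact h3
        · have h3 := (PySem.Set.contains_iff v m).2
            (hiff.1 ((PySem.Set.contains_iff (PySem.Set.add v n) m).1 h1))
          rw [h2] at h3
          exact h3.symm
      rw [hcc]
    by_cases hn : PySem.Set.contains v n = true
    · have hnf : (!PySem.Set.contains v n) = false := by rw [hn]; rfl
      have hfc : (n :: ns).filter (fun m => !PySem.Set.contains v m)
          = ns.filter (fun m => !PySem.Set.contains v m) := by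
        rw [List.filter_cons, if_neg (by rw [hnf]; exact Bool.false_ne_true)]
      rw [hfc]
      dsimp only [List.foldl_cons]
      rw [if_pos hn]
      exact ih hnd' q v
    · have hn0 : PySem.Set.contains v n = false := by
        revert hn; cases PySem.Set.contains v n <;> simp
      have hn' : (!PySem.Set.contains v n) = true := by rw [hn0]; rfl
      have hfc : (n :: ns).filter (fun m => !PySem.Set.contains v m)
          = n :: ns.filter (fun m => !PySem.Set.contains v m) := by
        rw [List.filter_cons, if_pos hn']
      rw [hfc]
      dsimp only [List.foldl_cons]
      rw [if_neg hn]
      rw [ih hnd' (q ++ [n]) (PySem.Set.add v n), hfilter]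
      rw [PySem.Set.update_cons, List.append_assoc]
      rfl

lemma pvER_pop {dim : Int × Int × Int × Int × Int × Int} {c : Int × Int × Int}
    {q fresh : List (Int × Int × Int)} {V : (Int × Int × Int) → Prop}
    (hF : ∀ n, n ∈ fresh ↔ n ∈ pvNeighborList c ∧ ¬ V n)
    (hc : pvOnEdge c dim = false) :
    pvER dim (c :: q) V ↔ pvER dim (q ++ fresh) (fun x => V x ∨ x ∈ fresh) := by
  constructor
  · rintro ⟨b, hb, cc, hr, hcc⟩
    rcases List.mem_cons.1 hb with rfl | hbq
    · cases hr with
      | refl => rw [hc] at hcc; exact absurd hcc (by simp)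
      | @head _ x _ hn hv hr' =>
        have hx : x ∈ fresh := (hF x).2 ⟨hn, hv⟩
        rcases pvRA_upgrade (N := fun y => y ∈ fresh) hr' with h | ⟨d, hd, h⟩
        · exact ⟨x, List.mem_append_right _ hx, cc, h, hcc⟩
        · exact ⟨d, List.mem_append_right _ hd, cc, h, hcc⟩
    · rcases pvRA_upgrade (N := fun y => y ∈ fresh) hr with h | ⟨d, hd, h⟩
      · exact ⟨b, List.mem_append_left _ hbq, cc, h, hcc⟩
      · exact ⟨d, List.mem_append_right _ hd, cc, h, hcc⟩
  · rintro ⟨b, hb, cc, hr, hcc⟩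
    have hrV : pvRA V b cc := pvRA_mono (fun x hx => Or.inl hx) hr
    rcases List.mem_append.1 hb with hbq | hbf
    · exact ⟨b, List.mem_cons_of_mem _ hbq, cc, hrV, hcc⟩
    · obtain ⟨hn, hv⟩ := (hF b).1 hbf
      exact ⟨c, List.mem_cons_self, cc, pvRA.head hn hv hrV, hcc⟩

-- main characterization of A's loop
lemma pvGoA_iff (dim : Int × Int × Int × Int × Int × Int) :
    ∀ (fuel : Nat) (border visited : PySem.Set (Int × Int × Int)),
      (∀ b ∈ border, b ∈ visited) →
      (∀ b ∈ border, b ∈ pvBox dim) →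
      ((pvBox dim \ visited.toFinset).card + 1 ≤ fuel) →
      (pvGoA dim border visited fuel = true ↔ pvER dim border (fun x => x ∈ visited)) := by
  intro fuel
  induction fuel with
  | zero => intro border visited _ _ h3; omega
  | succ f ih =>
    intro border visited h1 h2 h3
    by_cases hb0 : border = []
    · subst hb0
      rw [pvGoA_nil]
      simp [pvER]
    · have hlen : 0 < PySem.Set.len border := by
        simp only [PySem.Set.len, Int.natCast_pos, List.length_pos_iff]
        exact hb0
      by_cases hedge : border.any (fun c => pvOnEdge c dim) = true
      · simp only [pvGoA]
        rw [if_pos hlen, if_pos hedge]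
        obtain ⟨c, hc, he⟩ := List.any_eq_true.1 hedge
        exact iff_of_true rfl ⟨c, hc, c, pvRA.refl _, he⟩
      · have hnoedge : ∀ b ∈ border, pvOnEdge b dim = false := by
          intro b hb
          by_contra h
          exact hedge (List.any_eq_true.2 ⟨b, hb, by simpa using h⟩)
        simp only [pvGoA]
        rw [if_pos hlen, if_neg hedge]
        have hNBmem : ∀ n, n ∈ pvNewBorder border visited ↔
            ∃ b ∈ border, n ∈ pvNeighborList b ∧ n ∉ visited := pvMem_newBorder border visited
        rw [pvER_step hNBmem]
        have hnoedge' : ¬ ∃ b ∈ border, pvOnEdge b dim = true := by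
          rintro ⟨b, hb, h⟩
          rw [hnoedge b hb] at h
          exact absurd h (by simp)
        rw [or_iff_right hnoedge']
        by_cases hNB : pvNewBorder border visited = []
        · rw [hNB, pvGoA_nil]
          simp [pvER]
        · obtain ⟨n0, hn0⟩ := List.exists_mem_of_ne_nil _ hNB
          have hNBbox : ∀ n ∈ pvNewBorder border visited, n ∈ pvBox dim := by
            intro n hn
            obtain ⟨b, hb, hnb, _⟩ := (hNBmem n).1 hn
            exact pvNbr_in_box (h2 b hb) (hnoedge b hb) hnb
          have hn0box : n0 ∈ pvBox dim := hNBbox n0 hn0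
          have hn0vis : n0 ∉ visited := by
            obtain ⟨b, hb, hnb, hv⟩ := (hNBmem n0).1 hn0
            exact hv
          have hcard : (pvBox dim \ (PySem.Set.union visited (pvNewBorder border visited)).toFinset).card
              < (pvBox dim \ visited.toFinset).card := by
            apply Finset.card_lt_card
            constructor
            · intro x hx
              simp only [Finset.mem_sdiff, List.mem_toFinset, PySem.Set.mem_union] at hx ⊢
              exact ⟨hx.1, fun h => hx.2 (Or.inl h)⟩
            · intro hsub
              have h5 : n0 ∈ pvBox dim \ (PySem.Set.union visited (pvNewBorder border visited)).toFinset :=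
                hsub (by simp only [Finset.mem_sdiff, List.mem_toFinset]; exact ⟨hn0box, hn0vis⟩)
              simp only [Finset.mem_sdiff, List.mem_toFinset, PySem.Set.mem_union] at h5
              exact h5.2 (Or.inr hn0)
          rw [ih (pvNewBorder border visited) (PySem.Set.union visited (pvNewBorder border visited))
            (fun b hb => (PySem.Set.mem_union _ _ _).2 (Or.inr hb)) hNBbox (by omega)]
          exact pvER_congr (fun x => (PySem.Set.mem_union _ _ _))

-- main characterization of B's loop
lemma pvGoB_iff (dim : Int × Int × Int × Int × Int × Int) :
    ∀ (fuel : Nat) (queue : List (Int × Int × Int)) (visited : PySem.Set (Int × Int × Int)),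
      (∀ b ∈ queue, b ∈ visited) →
      (∀ b ∈ queue, b ∈ pvBox dim) →
      ((pvBox dim \ visited.toFinset).card + queue.length + 1 ≤ fuel) →
      (pvGoB dim queue visited fuel = true ↔ pvER dim queue (fun x => x ∈ visited)) := by
  intro fuel
  induction fuel with
  | zero => intro queue visited _ _ h3; omega
  | succ f ih =>
    intro queue visited h1 h2 h3
    rcases queue with _ | ⟨c, q⟩
    · simp [pvGoB, pvER]
    · by_cases hedge : pvOnEdge c dim = true
      · simp only [pvGoB]
        rw [if_pos hedge]
        exact iff_of_true rfl ⟨c, List.mem_cons_self, c, pvRA.refl _, hedge⟩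
      · have hedge' : pvOnEdge c dim = false := by
          revert hedge; cases pvOnEdge c dim <;> simp
        simp only [pvGoB]
        rw [if_neg hedge]
        rw [pvPush_foldl (pvNeighborList c) (pvNodup_neighborList c) q visited]
        dsimp only
        set fresh := (pvNeighborList c).filter (fun n => !PySem.Set.contains visited n) with hfr
        have hF : ∀ n, n ∈ fresh ↔ n ∈ pvNeighborList c ∧ n ∉ visited := by
          intro n
          rw [hfr, List.mem_filter]
          constructor
          · rintro ⟨ha, hb⟩
            refine ⟨ha, fun hv => ?_⟩
            rw [(PySem.Set.contains_iff visited n).2 hv] at hb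
            simp at hb
          · rintro ⟨ha, hb⟩
            refine ⟨ha, ?_⟩
            cases h : PySem.Set.contains visited n
            · rfl
            · exact absurd ((PySem.Set.contains_iff visited n).1 h) hb
        have hfresh_nodup : fresh.Nodup := (pvNodup_neighborList c).filter _
        have hfresh_box : ∀ n ∈ fresh, n ∈ pvBox dim := by
          intro n hn
          exact pvNbr_in_box (h2 c List.mem_cons_self) hedge' ((hF n).1 hn).1
        have hsub : fresh.toFinset ⊆ pvBox dim \ visited.toFinset := by
          intro n hn
          rw [List.mem_toFinset] at hn
          simp only [Finset.mem_sdiff, List.mem_toFinset]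
          exact ⟨hfresh_box n hn, ((hF n).1 hn).2⟩
        have hset : pvBox dim \ (PySem.Set.update visited fresh).toFinset
            = (pvBox dim \ visited.toFinset) \ fresh.toFinset := by
          ext x
          simp only [Finset.mem_sdiff, List.mem_toFinset, PySem.Set.mem_update]
          tauto
        have hcard : (pvBox dim \ (PySem.Set.update visited fresh).toFinset).card
            = (pvBox dim \ visited.toFinset).card - fresh.length := by
          rw [hset, Finset.card_sdiff, Finset.inter_eq_left.2 hsub,
            List.toFinset_card_of_nodup hfresh_nodup]
        have hle : fresh.length ≤ (pvBox dim \ visited.toFinset).card := by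
          rw [← List.toFinset_card_of_nodup hfresh_nodup]
          exact Finset.card_le_card hsub
        rw [ih (q ++ fresh) (PySem.Set.update visited fresh)
          (by
            intro b hb
            rw [PySem.Set.mem_update]
            rcases List.mem_append.1 hb with h | h
            · exact Or.inl (h1 b (List.mem_cons_of_mem _ h))
            · exact Or.inr h)
          (by
            intro b hb
            rcases List.mem_append.1 hb with h | h
            · exact h2 b (List.mem_cons_of_mem _ h)
            · exact hfresh_box b h)
          (by
            rw [hcard, List.length_append]
            simp only [List.length_cons] at h3
            omega)]
        rw [pvER_congr (fun x => (PySem.Set.mem_update visited fresh x))]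
        exact (pvER_pop hF hedge').symm

-- ===== VERDICT (by name: the statement is the Claim_ definition above) =====
theorem grows_to_edge_spec : Claim_equal_grows_to_edge := by
  intro cube cubes air_cubes _hdom hpre
  unfold Spec_grows_to_edge grows_to_edge grows_to_edge_alt
  by_cases hair : cube ∈ air_cubes
  · rw [if_pos hair, if_pos hair]
  · rw [if_neg hair, if_neg hair]
    have hbox := hpre.resolve_left hair
    obtain ⟨⟨a1, ha1, hle1⟩, ⟨a2, ha2, hle2⟩, ⟨a3, ha3, hle3⟩,
      ⟨a4, ha4, hle4⟩, ⟨a5, ha5, hle5⟩, ⟨a6, ha6, hle6⟩⟩ := hbox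
    have hne : cubes ≠ [] := List.ne_nil_of_mem ha1
    rcases hmx : PySem.List.min? cubes (fun c => c.1) with _ | mx
    · exact absurd ((PySem.List.min?_eq_none_iff _ _).1 hmx) hne
    rcases hMx : PySem.List.max? cubes (fun c => c.1) with _ | Mx
    · exact absurd ((PySem.List.max?_eq_none_iff _ _).1 hMx) hne
    rcases hmy : PySem.List.min? cubes (fun c => c.2.1) with _ | my
    · exact absurd ((PySem.List.min?_eq_none_iff _ _).1 hmy) hne
    rcases hMy : PySem.List.max? cubes (fun c => c.2.1) with _ | My
    · exact absurd ((PySem.List.max?_eq_none_iff _ _).1 hMy) hne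
    rcases hmz : PySem.List.min? cubes (fun c => c.2.2) with _ | mz
    · exact absurd ((PySem.List.min?_eq_none_iff _ _).1 hmz) hne
    rcases hMz : PySem.List.max? cubes (fun c => c.2.2) with _ | Mz
    · exact absurd ((PySem.List.max?_eq_none_iff _ _).1 hMz) hne
    have hdims : pvDimensions cubes = some (mx.1, Mx.1, my.2.1, My.2.1, mz.2.2, Mz.2.2) := by
      unfold pvDimensions
      rw [hmx, hMx, hmy, hMy, hmz, hMz]
    rw [hdims]
    dsimp only
    have b1 : mx.1 ≤ cube.1 := le_trans (PySem.List.min?_isMin hmx a1 ha1) hle1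
    have b2 : cube.1 ≤ Mx.1 := le_trans hle2 (PySem.List.max?_isMax hMx a2 ha2)
    have b3 : my.2.1 ≤ cube.2.1 := le_trans (PySem.List.min?_isMin hmy a3 ha3) hle3
    have b4 : cube.2.1 ≤ My.2.1 := le_trans hle4 (PySem.List.max?_isMax hMy a4 ha4)
    have b5 : mz.2.2 ≤ cube.2.2 := le_trans (PySem.List.min?_isMin hmz a5 ha5) hle5
    have b6 : cube.2.2 ≤ Mz.2.2 := le_trans hle6 (PySem.List.max?_isMax hMz a6 ha6)
    have hinbox : pvInBox cube (mx.1, Mx.1, my.2.1, My.2.1, mz.2.2, Mz.2.2) = true := by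
      obtain ⟨x, y, z⟩ := cube
      simp only [pvInBox, Bool.and_eq_true, decide_eq_true_eq]
      exact ⟨⟨⟨⟨⟨b1, b2⟩, b3⟩, b4⟩, b5⟩, b6⟩
    rw [if_pos hinbox, if_pos hinbox]
    have hofL : PySem.Set.ofList [cube] = [cube] := rfl
    have hcubebox : cube ∈ pvBox (mx.1, Mx.1, my.2.1, My.2.1, mz.2.2, Mz.2.2) := by
      rw [pvMem_box]
      exact ⟨b1, b2, b3, b4, b5, b6⟩
    have hcard := pvBox_card_le (mx.1, Mx.1, my.2.1, My.2.1, mz.2.2, Mz.2.2)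
    rw [Bool.eq_iff_iff]
    rw [hofL]
    rw [pvGoA_iff (mx.1, Mx.1, my.2.1, My.2.1, mz.2.2, Mz.2.2) (pvFuel _) [cube]
      (PySem.Set.union (PySem.Set.union (PySem.Set.ofList cubes) air_cubes) [cube])
      (by
        intro b hb
        rw [List.mem_singleton] at hb
        subst hb
        exact (PySem.Set.mem_union _ _ _).2 (Or.inr List.mem_cons_self))
      (by
        intro b hb
        rw [List.mem_singleton] at hb
        subst hb
        exact hcubebox)
      (by
        have hle := Finset.card_le_card
          (Finset.sdiff_subset (s := pvBox (mx.1, Mx.1, my.2.1, My.2.1, mz.2.2, Mz.2.2))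
            (t := (PySem.Set.union (PySem.Set.union (PySem.Set.ofList cubes) air_cubes) [cube]).toFinset))
        omega)]
    rw [pvGoB_iff (mx.1, Mx.1, my.2.1, My.2.1, mz.2.2, Mz.2.2) (pvFuel _) [cube]
      (PySem.Set.add (PySem.Set.update (PySem.Set.ofList cubes) air_cubes) cube)
      (by
        intro b hb
        rw [List.mem_singleton] at hb
        subst hb
        exact (PySem.Set.mem_add _ _ _).2 (Or.inr rfl))
      (by
        intro b hb
        rw [List.mem_singleton] at hb
        subst hb
        exact hcubebox)
      (by
        have hle := Finset.card_le_card
          (Finset.sdiff_subset (s := pvBox (mx.1, Mx.1, my.2.1, My.2.1, mz.2.2, Mz.2.2))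
            (t := (PySem.Set.add (PySem.Set.update (PySem.Set.ofList cubes) air_cubes) cube).toFinset))
        simp only [List.length_cons, List.length_nil]
        omega)]
    apply pvER_congr
    intro x
    simp only [PySem.Set.mem_union, PySem.Set.mem_add, PySem.Set.mem_update,
      PySem.Set.mem_ofList, List.mem_singleton]
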